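-- pv_equiv track=rewrite | github.com/BiggestTwo/Assembler | lib/util.py | buildLiteralValue
-- ===== SOURCE A (Python) =====
-- def decToHex(string_num):
--     base = [str(x) for x in range(10)] + [ chr(x) for x in range(ord('A'),ord('A')+6)]
--     num = int(string_num)
--     if num == 0 :
--         return '0'
--     result = ''
--     mid = []
--     while True:
--         if num == 0 :
--             break
--         num,rem = divmod(num, 16)
--         mid.append(base[rem])
--     for i in range(len(mid)) :
--         result = result + mid[len(mid) - i - 1]
--     return result
--
-- def buildLiteralValue(literal) :
--     literalType = literal[1]
--     literalString = literal[3: (len(literal) - 1) ]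
--     if literalType == 'X' : # hexadecimal
--         return literalString
--     if literalType == 'C' : # char string
--         resultString = ''
--         for i in range(len(literalString)) :
--             resultString = resultString + decToHex(str(ord(literalString[i])))
--         return resultString
--     return '00'
-- ===== SOURCE B (Python) =====
-- def buildLiteralValue(literal):
--     literalType = literal[1]
--     literalString = literal[3: (len(literal) - 1)]
--     if literalType == 'X':  # hexadecimal
--         return literalString
--     if literalType == 'C':  # char string
--         return ''.join(format(ord(c), 'X') for c in literalString)
--     return '00'
-- ===== Notes on version B (the rewrite author's own statement) =====
-- stated objective: idiomatic
-- what changed: The per-character hex conversion via manual divmod loop, digit table and index-reversal pass (decToHex) is replaced by the library formatting format(ord(c), 'X') joined over the string in one generator expression.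
import Mathlib
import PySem

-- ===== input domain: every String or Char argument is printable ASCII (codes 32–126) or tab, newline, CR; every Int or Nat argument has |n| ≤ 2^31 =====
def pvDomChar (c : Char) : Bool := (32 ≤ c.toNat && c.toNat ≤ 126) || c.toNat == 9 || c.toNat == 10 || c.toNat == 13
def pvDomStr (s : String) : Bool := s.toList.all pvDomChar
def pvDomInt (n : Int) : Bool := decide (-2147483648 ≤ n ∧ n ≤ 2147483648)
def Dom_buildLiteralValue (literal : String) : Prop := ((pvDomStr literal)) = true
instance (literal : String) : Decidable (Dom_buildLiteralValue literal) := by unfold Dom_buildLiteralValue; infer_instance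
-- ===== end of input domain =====

-- B replaces A's hand-rolled divmod/digit-table/reversal hex conversion by library hex formatting.

-- ===== PORT A =====
-- base = [str(x) for x in range(10)] + [chr(x) for x in range(ord('A'), ord('A')+6)]
def decToHexBase : List (List Char) :=
  (PySem.List.pyRange 0 10 1).map (fun x => PySem.Int.toChars x) ++
  (PySem.List.pyRange 65 71 1).map (fun x => [Char.ofNat x.toNat])

-- the 'while True' loop of decToHex; fuel bounds the iterations (the loop only
-- terminates in Python for num ≥ 0, and num.natAbs iterations always suffice then)
def decToHexLoop : Nat → Int → List (List Char) → List (List Char)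
  | 0, _, mid => mid
  | fuel + 1, num, mid =>
    if num = 0 then mid
    else
      decToHexLoop fuel (PySem.Int.floordiv num 16)
        (mid ++ [PySem.List.pyGetD decToHexBase (PySem.Int.mod num 16) []])

def decToHex (string_num : List Char) : List Char :=
  match PySem.Int.ofChars? string_num with
  | none => []   -- int() raises ValueError here; unreachable from buildLiteralValue's call site
  | some num =>
    if num = 0 then ['0']
    else
      let mid := decToHexLoop num.natAbs num []
      -- for i in range(len(mid)): result = result + mid[len(mid) - i - 1]
      (PySem.List.pyRange 0 (mid.length : Int) 1).foldl
        (fun result i => result ++ PySem.List.pyGetD mid ((mid.length : Int) - i - 1) []) []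

def buildLiteralValue (literal : String) : String :=
  let cs := literal.toList
  let literalType := PySem.List.pyGetD cs 1 ' '   -- literal[1]; Pre_ excludes the IndexError
  let literalString := PySem.List.slice cs (some 3) (some ((cs.length : Int) - 1))
  if literalType = 'X' then String.ofList literalString
  else if literalType = 'C' then
    String.ofList ((PySem.List.pyRange 0 (literalString.length : Int) 1).foldl
      (fun resultString i =>
        resultString ++ decToHex (PySem.Int.toChars ((PySem.List.pyGetD literalString i ' ').toNat : Int))) [])
  else "00"

-- ===== PORT B =====
-- library hex formatting of ord(c): uppercase digits, no prefix, single zero digit for zero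
def hexUpper (n : Nat) : List Char := (Nat.toDigits 16 n).map Char.toUpper

def buildLiteralValue_alt (literal : String) : String :=
  let cs := literal.toList
  let literalType := PySem.List.pyGetD cs 1 ' '
  let literalString := PySem.List.slice cs (some 3) (some ((cs.length : Int) - 1))
  if literalType = 'X' then String.ofList literalString
  else if literalType = 'C' then
    String.ofList (literalString.flatMap (fun c => hexUpper c.toNat))
  else "00"

-- ===== PRECONDITION & SPEC =====
-- literal[1] raises IndexError on strings shorter than 2 characters
def Pre_buildLiteralValue (literal : String) : Prop := 2 ≤ literal.toList.length
instance (literal : String) : Decidable (Pre_buildLiteralValue literal) := by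
  unfold Pre_buildLiteralValue; infer_instance
def pvWitness_buildLiteralValue : String := "=C'AB'"

def Spec_buildLiteralValue (literal : String) (out : String) : Prop := out = buildLiteralValue_alt literal
instance (literal : String) (out : String) : Decidable (Spec_buildLiteralValue literal out) := by unfold Spec_buildLiteralValue; infer_instance

-- ===== CLAIM (what is proved, stated in full; the proofs are below) =====
def Claim_equal_buildLiteralValue : Prop := ∀ (literal : String), Dom_buildLiteralValue literal → Pre_buildLiteralValue literal → Spec_buildLiteralValue literal (buildLiteralValue literal)

-- ===== LEMMAS AND PROOFS =====

-- per-character agreement on every domain character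
set_option maxRecDepth 4000 in
theorem decToHex_eq_hexUpper (n : Nat) (h : n < 127) :
    decToHex (PySem.Int.toChars (n : Int)) = hexUpper n := by
  revert n h; decide

theorem flatMap_agree (s : List Char) (h : ∀ c ∈ s, pvDomChar c = true) :
    s.flatMap (fun c => decToHex (PySem.Int.toChars (c.toNat : Int))) =
    s.flatMap (fun c => hexUpper c.toNat) := by
  induction s with
  | nil => rfl
  | cons c t ih =>
    have hc := h c (List.mem_cons_self ..)
    have hn : c.toNat < 127 := by
      simp [pvDomChar] at hc; omega
    simp only [List.flatMap_cons, decToHex_eq_hexUpper c.toNat hn,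
      ih (fun x hx => h x (List.mem_cons_of_mem _ hx))]

-- ===== VERDICT (by name: the statement is the Claim_ definition above) =====
theorem buildLiteralValue_spec : Claim_equal_buildLiteralValue := by
  intro literal hdom _hpre
  unfold Spec_buildLiteralValue buildLiteralValue buildLiteralValue_alt
  simp only []
  split_ifs with h1 h2
  · rfl
  · congr 1
    rw [PySem.List.foldl_pyRange_pyGetD' (d := ' ')
      (f := fun acc c => acc ++ decToHex (PySem.Int.toChars (c.toNat : Int)))]
    rw [PySem.List.foldl_append_eq_flatMap]
    simp only [List.nil_append, Int.toNat_zero, List.drop_zero]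
    apply flatMap_agree
    intro c hc
    have hmem : c ∈ literal.toList := PySem.List.mem_of_mem_slice _ _ _ hc
    have := hdom
    unfold Dom_buildLiteralValue pvDomStr at this
    exact List.all_eq_true.mp this c hmem
    exact le_refl 0
  · rfl
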